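-- pv_equiv track=rewrite | github.com/AdrianSuliga/WDI | 03 - Zadania z pętlami 2/ex_14.py | takeOffMask
-- ===== SOURCE A (Python) =====
-- def takeOffMask(length, a, b, binForm):
--     finalNum, cnt = 0, 0
--     for x in binForm:
--         if x == 0:
--             finalNum += (b % 10) * 10**cnt
--             b //= 10
--         if x == 1:
--             finalNum += (a % 10) * 10**cnt
--             a //= 10
--         cnt += 1
--     return finalNum
-- ===== SOURCE B (Python) =====
-- def takeOffMask(length, a, b, binForm):
--     # The 0-positions and 1-positions are disjoint, so the result decomposes into
--     # the sum of two independent per-source contributions: spread b's digits over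
--     # the 0-positions and a's digits over the 1-positions, then assemble both
--     # spreads at once with one reverse-zip Horner fold.
--     def spread(n, bit):
--         out = []
--         for x in binForm:
--             if x == bit:
--                 out.append(n % 10)
--                 n //= 10
--             else:
--                 out.append(0)
--         return out
--     total = 0
--     for db, da in zip(reversed(spread(b, 0)), reversed(spread(a, 1))):
--         total = total * 10 + db + da
--     return total
-- ===== Notes on version B (the rewrite author's own statement) =====
-- stated objective: alternative
-- what changed: Decomposes the result into the sum of two independent per-source digit spreads (b over the 0-positions, a over the 1-positions), assembled by a single reverse-zip Horner fold, instead of A's one interleaved stateful loop accumulating with 10**cnt place values.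
import Mathlib
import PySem

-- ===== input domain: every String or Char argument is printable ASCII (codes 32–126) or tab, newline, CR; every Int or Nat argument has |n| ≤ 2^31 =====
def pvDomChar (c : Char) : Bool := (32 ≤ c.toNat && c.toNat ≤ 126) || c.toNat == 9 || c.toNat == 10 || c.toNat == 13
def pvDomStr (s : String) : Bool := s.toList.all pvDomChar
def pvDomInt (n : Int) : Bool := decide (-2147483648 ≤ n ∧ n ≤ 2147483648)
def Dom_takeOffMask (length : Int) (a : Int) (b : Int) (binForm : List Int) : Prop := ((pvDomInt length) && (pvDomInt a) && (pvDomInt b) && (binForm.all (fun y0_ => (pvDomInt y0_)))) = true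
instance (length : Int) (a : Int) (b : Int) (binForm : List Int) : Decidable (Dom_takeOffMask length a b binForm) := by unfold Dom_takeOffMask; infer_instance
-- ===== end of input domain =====

-- B decomposes the result into the sum of two independent per-source digit spreads
-- (b over the 0-positions, a over the 1-positions) assembled by one reverse-zip Horner
-- fold, instead of A's interleaved stateful loop with 10**cnt (objective: alternative).


-- ===== PORT A =====
-- 10**cnt (cnt is the loop counter, always a Nat)
def pvPow10 : Nat → Int
  | 0 => 1
  | n + 1 => pvPow10 n * 10

-- A's loop: state (finalNum, cnt, a, b); the two ifs are sequential, exactly as in Python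
def takeOffMaskLoopA : List Int → Int → Nat → Int → Int → Int
  | [], finalNum, _, _, _ => finalNum
  | x :: xs, finalNum, cnt, a, b =>
    let fb := if x = 0 then (finalNum + PySem.Int.mod b 10 * pvPow10 cnt, PySem.Int.floordiv b 10)
              else (finalNum, b)
    let fa := if x = 1 then (fb.1 + PySem.Int.mod a 10 * pvPow10 cnt, PySem.Int.floordiv a 10)
              else (fb.1, a)
    takeOffMaskLoopA xs fa.1 (cnt + 1) fa.2 fb.2

def takeOffMask (length : Int) (a : Int) (b : Int) (binForm : List Int) : Int :=
  takeOffMaskLoopA binForm 0 0 a b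

-- ===== PORT B =====
-- spread n's digits over the positions of binForm holding `bit` (0 elsewhere)
def pvSpread (binForm : List Int) (n : Int) (bit : Int) : List Int :=
  match binForm with
  | [] => []
  | x :: xs =>
    if x = bit then PySem.Int.mod n 10 :: pvSpread xs (PySem.Int.floordiv n 10) bit
    else 0 :: pvSpread xs n bit

def takeOffMask_alt (length : Int) (a : Int) (b : Int) (binForm : List Int) : Int :=
  (List.zip (pvSpread binForm b 0).reverse (pvSpread binForm a 1).reverse).foldl
    (fun total p => total * 10 + p.1 + p.2) 0

-- ===== PRECONDITION & SPEC =====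
def Spec_takeOffMask (length : Int) (a : Int) (b : Int) (binForm : List Int) (out : Int) : Prop := out = takeOffMask_alt length a b binForm
instance (length : Int) (a : Int) (b : Int) (binForm : List Int) (out : Int) : Decidable (Spec_takeOffMask length a b binForm out) := by unfold Spec_takeOffMask; infer_instance

-- ===== CLAIM (what is proved, stated in full; the proofs are below) =====
def Claim_equal_takeOffMask : Prop := ∀ (length : Int) (a : Int) (b : Int) (binForm : List Int), Dom_takeOffMask length a b binForm → Spec_takeOffMask length a b binForm (takeOffMask length a b binForm)

-- ===== LEMMAS AND PROOFS =====
-- value of B's zip-Horner pass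
def pvZipHorner (l1 l2 : List Int) : Int :=
  (List.zip l1.reverse l2.reverse).foldl (fun total p => total * 10 + p.1 + p.2) 0

theorem pvSpread_length (l : List Int) : ∀ (n bit : Int), (pvSpread l n bit).length = l.length := by
  induction l with
  | nil => intro n bit; rfl
  | cons x xs ih => intro n bit; by_cases h : x = bit <;> simp [pvSpread, h, ih]

theorem pvZipHorner_cons (d1 d2 : Int) (l1 l2 : List Int) (h : l1.length = l2.length) :
    pvZipHorner (d1 :: l1) (d2 :: l2) = d1 + d2 + 10 * pvZipHorner l1 l2 := by
  have hz : List.zip (l1.reverse ++ [d1]) (l2.reverse ++ [d2])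
      = List.zip l1.reverse l2.reverse ++ [(d1, d2)] :=
    List.zip_append (by simp [h])
  simp [pvZipHorner, hz, List.foldl_append]
  ring

-- A's loop equals finalNum + 10^cnt * (B's zip-Horner of the two spreads)
theorem loopA_eq (l : List Int) : ∀ (fn : Int) (cnt : Nat) (a b : Int),
    takeOffMaskLoopA l fn cnt a b
      = fn + pvPow10 cnt * pvZipHorner (pvSpread l b 0) (pvSpread l a 1) := by
  induction l with
  | nil => intro fn cnt a b; simp [takeOffMaskLoopA, pvSpread, pvZipHorner]
  | cons x xs ih =>
    intro fn cnt a b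
    have hlen : ∀ (n m bit bit' : Int), (pvSpread xs n bit).length = (pvSpread xs m bit').length := by
      intro n m bit bit'; rw [pvSpread_length, pvSpread_length]
    by_cases h0 : x = 0
    · have h1 : x ≠ 1 := by omega
      simp [takeOffMaskLoopA, pvSpread, h0, ih, pvZipHorner_cons _ _ _ _ (hlen _ _ _ _), pvPow10]
      ring
    · by_cases h1 : x = 1
      · simp [takeOffMaskLoopA, pvSpread, h1, ih, pvZipHorner_cons _ _ _ _ (hlen _ _ _ _), pvPow10]
        ring
      · simp [takeOffMaskLoopA, pvSpread, h0, h1, ih, pvZipHorner_cons _ _ _ _ (hlen _ _ _ _), pvPow10]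
        ring

-- ===== VERDICT (by name: the statement is the Claim_ definition above) =====
theorem takeOffMask_spec : Claim_equal_takeOffMask := by
  intro length a b binForm _
  show takeOffMask length a b binForm = takeOffMask_alt length a b binForm
  rw [takeOffMask, loopA_eq]
  rw [show pvPow10 0 = 1 from rfl, one_mul, zero_add]
  rfl
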